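-- pv_equiv track=rewrite | github.com/LohseLab/gIMble | src/graph.py | state_from_lol
-- ===== SOURCE A (Python) =====
-- def state_from_lol(pops, ploidy=1):
--     state = []
--     for pop in pops:
--         if len(pop) == 0:
--             state.append((),)
--         else:
--             sub_state = []
--             for s in pop:
--                 for p in range(ploidy):
--                     sub_state.append(s)
--             state.append(tuple(sorted(sub_state)))
--     return tuple(state)
-- ===== SOURCE B (Python) =====
-- def state_from_lol(pops, ploidy=1):
--     # Sort each population first, then replicate each element ploidy times
--     # in that sorted order (sort-before-expand instead of expand-then-sort).
--     return tuple(
--         tuple(x for x in sorted(pop) for _ in range(ploidy))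
--         for pop in pops
--     )
-- ===== Notes on version B (the rewrite author's own statement) =====
-- stated objective: alternative
-- what changed: B sorts each population first and then replicates every element ploidy times in sorted order via one comprehension with no empty-pop guard, instead of A's expand-then-sort accumulator loops with an explicit empty-pop branch.
import Mathlib
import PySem

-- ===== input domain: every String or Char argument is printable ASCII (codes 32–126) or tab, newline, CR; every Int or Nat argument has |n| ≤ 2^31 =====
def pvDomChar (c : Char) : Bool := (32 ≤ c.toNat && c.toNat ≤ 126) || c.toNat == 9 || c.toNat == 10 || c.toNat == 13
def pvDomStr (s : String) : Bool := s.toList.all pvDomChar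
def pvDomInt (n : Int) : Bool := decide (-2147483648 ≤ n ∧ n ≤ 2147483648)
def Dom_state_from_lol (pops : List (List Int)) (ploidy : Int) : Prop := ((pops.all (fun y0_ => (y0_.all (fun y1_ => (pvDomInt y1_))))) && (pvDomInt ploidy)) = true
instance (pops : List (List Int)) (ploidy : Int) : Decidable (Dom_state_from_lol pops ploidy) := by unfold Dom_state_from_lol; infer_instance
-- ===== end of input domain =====

-- B sorts each population first and then replicates every element ploidy times in sorted
-- order, instead of A's expand-then-sort with an explicit empty-pop branch (alternative
-- decomposition; return values proven equal on all inputs).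

-- ===== PORT A =====
def state_from_lol (pops : List (List Int)) (ploidy : Int) : List (List Int) :=
  -- state = []; for pop in pops: …; return tuple(state)
  pops.foldl (fun state pop =>
    if pop.length == 0 then
      state ++ [([] : List Int)]
    else
      -- sub_state = []; for s in pop: for p in range(ploidy): sub_state.append(s)
      state ++ [PySem.List.sorted
        (pop.foldl (fun acc s =>
          (PySem.List.pyRange 0 ploidy 1).foldl (fun acc2 _ => acc2 ++ [s]) acc) [])
        (fun x => x) false]) []

-- ===== PORT B =====
def state_from_lol_alt (pops : List (List Int)) (ploidy : Int) : List (List Int) :=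
  -- tuple(tuple(x for x in sorted(pop) for _ in range(ploidy)) for pop in pops)
  pops.map (fun pop =>
    (PySem.List.sorted pop (fun x => x) false).flatMap
      (fun x => (PySem.List.pyRange 0 ploidy 1).map (fun _ => x)))

-- ===== PRECONDITION & SPEC =====
def Spec_state_from_lol (pops : List (List Int)) (ploidy : Int) (out : List (List Int)) : Prop := out = state_from_lol_alt pops ploidy
instance (pops : List (List Int)) (ploidy : Int) (out : List (List Int)) : Decidable (Spec_state_from_lol pops ploidy out) := by unfold Spec_state_from_lol; infer_instance

-- ===== CLAIM (what is proved, stated in full; the proofs are below) =====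
def Claim_equal_state_from_lol : Prop := ∀ (pops : List (List Int)) (ploidy : Int), Dom_state_from_lol pops ploidy → Spec_state_from_lol pops ploidy (state_from_lol pops ploidy)

-- ===== LEMMAS AND PROOFS =====

-- the inner replication block is `replicate ploidy.toNat`
theorem rep_eq (ploidy : Int) (s : Int) :
    (PySem.List.pyRange 0 ploidy 1).map (fun _ => s) = List.replicate ploidy.toNat s := by
  rw [List.map_const']
  simp [PySem.List.length_pyRange_one]

-- A's innermost loop appends s once per range element
theorem inner_eq (ploidy : Int) (s : Int) (acc : List Int) :
    (PySem.List.pyRange 0 ploidy 1).foldl (fun acc2 _ => acc2 ++ [s]) acc =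
      acc ++ List.replicate ploidy.toNat s := by
  rw [← rep_eq ploidy s]
  exact PySem.List.foldl_append_singleton_eq_map _ _ _

-- A's inner double loop builds pop.flatMap (replicate ploidy.toNat)
theorem subA_eq (pop : List Int) (ploidy : Int) :
    pop.foldl (fun acc s =>
      (PySem.List.pyRange 0 ploidy 1).foldl (fun acc2 _ => acc2 ++ [s]) acc) [] =
    pop.flatMap (fun s => List.replicate ploidy.toNat s) := by
  simp only [inner_eq]
  simpa using PySem.List.foldl_append_eq_flatMap (g := fun s => List.replicate ploidy.toNat s) (l := pop) (acc := [])

-- flatMap of replicate preserves being sorted (Pairwise ≤)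
theorem pairwise_flatMap_replicate (n : Nat) (xs : List Int)
    (h : xs.Pairwise (· ≤ ·)) :
    (xs.flatMap (fun s => List.replicate n s)).Pairwise (· ≤ ·) := by
  induction xs with
  | nil => simp
  | cons x xs ih =>
    rw [List.flatMap_cons]
    rcases List.pairwise_cons.mp h with ⟨hx, hxs⟩
    apply List.pairwise_append.mpr
    refine ⟨List.pairwise_replicate.mpr (Or.inr le_rfl), ih hxs, ?_⟩
    intro a ha b hb
    rcases List.eq_of_mem_replicate ha with rfl
    rcases List.mem_flatMap.mp hb with ⟨y, hy, hby⟩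
    rcases List.eq_of_mem_replicate hby with rfl
    exact hx _ hy

-- core: sorting the expanded list = expanding the sorted list
theorem sorted_flatMap_replicate (pop : List Int) (n : Nat) :
    PySem.List.sorted (pop.flatMap (fun s => List.replicate n s)) (fun x => x) false =
    (PySem.List.sorted pop (fun x => x) false).flatMap (fun s => List.replicate n s) := by
  apply PySem.List.sorted_id_eq_of_perm_of_pairwise
  · exact (PySem.List.sorted_perm pop (fun x => x) false).flatMap (fun a _ => List.Perm.refl _)
  · exact pairwise_flatMap_replicate n _ (PySem.List.sorted_pairwise pop (fun x => x))

-- per-population: A's branch equals B's comprehension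
theorem per_pop_eq (pop : List Int) (ploidy : Int) :
    (if pop.length == 0 then ([] : List Int)
     else PySem.List.sorted
       (pop.foldl (fun acc s =>
          (PySem.List.pyRange 0 ploidy 1).foldl (fun acc2 _ => acc2 ++ [s]) acc) [])
       (fun x => x) false) =
    (PySem.List.sorted pop (fun x => x) false).flatMap
      (fun x => (PySem.List.pyRange 0 ploidy 1).map (fun _ => x)) := by
  have hrep : (fun x : Int => (PySem.List.pyRange 0 ploidy 1).map (fun _ => x)) =
      fun s => List.replicate ploidy.toNat s := funext (rep_eq ploidy)
  rw [hrep]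
  cases pop with
  | nil => simp [PySem.List.sorted]
  | cons x xs =>
    simp only [subA_eq, sorted_flatMap_replicate]
    rw [if_neg (by simp)]

-- A's outer loop with generalized accumulator
theorem outer_fold (ploidy : Int) (l : List (List Int)) (st : List (List Int)) :
    l.foldl (fun state pop =>
      if pop.length == 0 then
        state ++ [([] : List Int)]
      else
        state ++ [PySem.List.sorted
          (pop.foldl (fun acc s =>
            (PySem.List.pyRange 0 ploidy 1).foldl (fun acc2 _ => acc2 ++ [s]) acc) [])
          (fun x => x) false]) st =
    st ++ l.map (fun pop =>
      (PySem.List.sorted pop (fun x => x) false).flatMap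
        (fun x => (PySem.List.pyRange 0 ploidy 1).map (fun _ => x))) := by
  induction l generalizing st with
  | nil => simp
  | cons p ps ih =>
    rw [List.foldl_cons]
    have hstep :
        (if p.length == 0 then
          st ++ [([] : List Int)]
        else
          st ++ [PySem.List.sorted
            (p.foldl (fun acc s =>
              (PySem.List.pyRange 0 ploidy 1).foldl (fun acc2 _ => acc2 ++ [s]) acc) [])
            (fun x => x) false]) =
        st ++ [(PySem.List.sorted p (fun x => x) false).flatMap
          (fun x => (PySem.List.pyRange 0 ploidy 1).map (fun _ => x))] := by
      rw [← per_pop_eq p ploidy]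
      split_ifs <;> rfl
    rw [hstep, ih, List.map_cons, List.append_assoc]
    rfl

-- ===== VERDICT (by name: the statement is the Claim_ definition above) =====
theorem state_from_lol_spec : Claim_equal_state_from_lol := by
  intro pops ploidy _
  show state_from_lol pops ploidy = state_from_lol_alt pops ploidy
  unfold state_from_lol state_from_lol_alt
  simpa using outer_fold ploidy pops []
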